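-- pv_equiv track=rewrite | github.com/staceeey89/ppois-2-2024 | lab1/src/lexical_analyzer.py | __check_digital_token
-- ===== SOURCE A (Python) =====
-- def __check_digital_token(token: str):
--     counter = 0
--     for char in token:
--         if char == ';':
--             continue
--         if char.isdigit() or char == '.':
--             if char == '.':
--                 counter += 1
--             if char == '.' and counter > 1:
--                 return f"Неверный ввод токена: {token}"
--         else:
--             return f"Неверный ввод токена: {token}"
-- ===== SOURCE B (Python) =====
-- def __check_digital_token(token: str):
--     cleaned = [c for c in token if c != ';']
--     if all(c.isdigit() or c == '.' for c in cleaned) and cleaned.count('.') <= 1: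
--         return None
--     return f"Неверный ввод токена: {token}"
-- ===== Notes on version B (the rewrite author's own statement) =====
-- stated objective: simpler
-- what changed: Replaced A's single interleaved stateful pass (dot counter with early returns mid-loop) by filtering out semicolons once and then deciding validity with two independent whole-string scans: an all() character-class check and a dot count compared to 1.
import Mathlib
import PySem

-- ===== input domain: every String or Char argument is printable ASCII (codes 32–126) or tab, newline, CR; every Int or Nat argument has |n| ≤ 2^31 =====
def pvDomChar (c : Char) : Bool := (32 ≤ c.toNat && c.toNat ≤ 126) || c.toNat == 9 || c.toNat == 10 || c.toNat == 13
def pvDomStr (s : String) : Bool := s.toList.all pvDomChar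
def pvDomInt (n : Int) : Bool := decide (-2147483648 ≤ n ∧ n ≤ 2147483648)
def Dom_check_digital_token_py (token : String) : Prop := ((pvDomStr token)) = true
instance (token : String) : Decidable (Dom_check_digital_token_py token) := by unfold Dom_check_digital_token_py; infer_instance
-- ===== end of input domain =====

-- B replaces A's single interleaved pass (dot counter + early returns) by a semicolon filter
-- followed by two independent scans (character-class all + dot count); objective: simpler.


-- ===== PORT A =====
-- the f-string error message
def cdtErr (token : String) : String := "Неверный ввод токена: " ++ token

-- the 'for char in token' loop, carrying 'counter'; returning some _ = the early returns,
-- none = falling off the loop (Python's implicit 'return None')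
def cdtLoopA (token : String) (cs : List Char) (counter : Int) : Option String :=
  match cs with
  | [] => none
  | c :: rest =>
    if c == ';' then cdtLoopA token rest counter
    else if PySem.Chars.isdigit c || c == '.' then
      let counter' := if c == '.' then counter + 1 else counter
      if c == '.' && decide (counter' > 1) then some (cdtErr token)
      else cdtLoopA token rest counter'
    else some (cdtErr token)

def check_digital_token_py (token : String) : Option String :=
  cdtLoopA token token.toList 0

-- ===== PORT B =====
def check_digital_token_py_alt (token : String) : Option String :=
  let cleaned := token.toList.filter (fun c => !(c == ';'))
  if cleaned.all (fun c => PySem.Chars.isdigit c || c == '.') &&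
     decide (PySem.List.count cleaned '.' ≤ 1) then none
  else some (cdtErr token)

-- ===== PRECONDITION & SPEC =====
def Spec_check_digital_token_py (token : String) (out : Option String) : Prop := out = check_digital_token_py_alt token
instance (token : String) (out : Option String) : Decidable (Spec_check_digital_token_py token out) := by unfold Spec_check_digital_token_py; infer_instance

-- ===== CLAIM (what is proved, stated in full; the proofs are below) =====
def Claim_equal_check_digital_token_py : Prop := ∀ (token : String), Dom_check_digital_token_py token → Spec_check_digital_token_py token (check_digital_token_py token)

-- ===== LEMMAS AND PROOFS =====

-- A's loop, started at any counter ≤ 1, returns none iff every non-';' char is a digit or a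
-- dot and the dots (plus the counter already accumulated) never exceed 1.
lemma cdtLoopA_eq (token : String) (cs : List Char) (counter : Int) (h : counter ≤ 1) :
    cdtLoopA token cs counter =
      (if ((cs.filter (fun c => !(c == ';'))).all (fun c => PySem.Chars.isdigit c || c == '.')
            ∧ counter + ((cs.filter (fun c => !(c == ';'))).count '.' : Int) ≤ 1)
       then none else some (cdtErr token)) := by
  induction cs generalizing counter with
  | nil => simp [cdtLoopA]; omega
  | cons c rest ih =>
    by_cases hsemi : c = ';'
    · subst hsemi
      simpa [cdtLoopA] using ih counter h
    · by_cases hdot : c = '.'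
      · subst hdot
        by_cases hc : counter + 1 > 1
        · have hstep : cdtLoopA token ('.' :: rest) counter = some (cdtErr token) := by
            simp [cdtLoopA, hc]
          rw [hstep, if_neg]
          rintro ⟨-, h2⟩
          simp only [List.filter_cons] at h2
          simp at h2
          omega
        · have h1 : counter + 1 ≤ 1 := by omega
          rw [show cdtLoopA token ('.' :: rest) counter = cdtLoopA token rest (counter + 1) by
                simp [cdtLoopA, hc]]
          rw [ih (counter + 1) h1]
          refine if_congr ?_ rfl rfl
          simp only [List.filter_cons]
          simp [PySem.Chars.isdigit]
          intro _
          omega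
      · by_cases hdig : PySem.Chars.isdigit c = true
        · rw [show cdtLoopA token (c :: rest) counter = cdtLoopA token rest counter by
                simp [cdtLoopA, hsemi, hdot, hdig]]
          rw [ih counter h]
          refine if_congr ?_ rfl rfl
          simp [hsemi, hdot, hdig]
        · have hstep : cdtLoopA token (c :: rest) counter = some (cdtErr token) := by
            simp [cdtLoopA, hsemi, hdot, hdig]
          rw [hstep, if_neg]
          rintro ⟨h1, -⟩
          simp [hsemi, hdig, hdot] at h1

-- ===== VERDICT (by name: the statement is the Claim_ definition above) =====
theorem check_digital_token_py_spec : Claim_equal_check_digital_token_py := by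
  intro token _
  unfold Spec_check_digital_token_py check_digital_token_py check_digital_token_py_alt
  rw [cdtLoopA_eq token token.toList 0 (by omega)]
  refine if_congr ?_ rfl rfl
  simp [PySem.List.count_eq]
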